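-- pv_equiv track=rewrite | github.com/pypi-data/pypi-mirror-398 | packages/thefuck-leeguoo/thefuck_leeguoo-3.39.tar.gz/thefuck_leeguoo-3.39/thefuck/ai.py | _strip_commands_section
-- ===== SOURCE A (Python) =====
-- def _is_commands_heading(line):
--     heading = line.lstrip('#').strip().rstrip(':').lower()
--     return heading in (
--         'commands', 'command', 'command suggestions', 'suggested commands'
--     )
--
-- def _strip_commands_section(content):
--     lines = content.splitlines()
--     output = []
--     in_section = False
--     for line in lines:
--         stripped = line.strip()
--         if _is_commands_heading(stripped):
--             in_section = True
--             continue
--         if in_section: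
--             if stripped.startswith('#') or not stripped:
--                 in_section = False
--             else:
--                 continue
--         if not in_section:
--             output.append(line)
--     return '\n'.join(output).strip()
-- ===== SOURCE B (Python) =====
-- def _is_commands_heading(line):
--     heading = line.lstrip('#').strip().rstrip(':').lower()
--     return heading in (
--         'commands', 'command', 'command suggestions', 'suggested commands'
--     )
--
-- def _strip_commands_section(content):
--     lines = content.splitlines()
--     out = []
--     i = 0
--     n = len(lines)
--     while i < n:
--         if _is_commands_heading(lines[i].strip()):
--             i += 1
--             while i < n:
--                 t = lines[i].strip()
--                 if _is_commands_heading(t) or (t and not t.startswith('#')):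
--                     i += 1
--                 else:
--                     break
--         else:
--             out.append(lines[i])
--             i += 1
--     return '\n'.join(out).strip()
-- ===== Notes on version B (the rewrite author's own statement) =====
-- stated objective: alternative
-- what changed: Replaced the boolean in_section flag loop with an explicit index while-loop that, on seeing a commands heading, runs an inner while that skips past the whole section and stops before the terminating blank/heading line.
import Mathlib
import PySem

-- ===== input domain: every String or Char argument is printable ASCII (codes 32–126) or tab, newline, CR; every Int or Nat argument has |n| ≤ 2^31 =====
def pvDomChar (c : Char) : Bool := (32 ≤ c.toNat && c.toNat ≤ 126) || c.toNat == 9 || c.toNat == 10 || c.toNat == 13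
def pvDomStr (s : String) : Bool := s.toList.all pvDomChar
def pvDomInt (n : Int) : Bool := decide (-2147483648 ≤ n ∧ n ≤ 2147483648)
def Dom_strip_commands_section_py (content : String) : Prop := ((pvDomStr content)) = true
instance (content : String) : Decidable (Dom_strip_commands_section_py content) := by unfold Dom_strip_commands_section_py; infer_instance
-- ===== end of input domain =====

-- B replaces A's boolean in_section flag with an index loop whose inner while skips a whole
-- commands section at once (objective: alternative decomposition, same cost).

-- ===== PORT A =====
-- line.lstrip('#'): exact hand port of single-char lstrip (drop leading '#')
def pvLstripHash (s : String) : String := String.ofList (s.toList.dropWhile (· == '#'))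
-- .rstrip(':'): exact hand port of single-char rstrip (drop trailing ':')
def pvRstripColon (s : String) : String := String.ofList ((s.toList.reverse.dropWhile (· == ':')).reverse)

def pvIsCommandsHeading (line : String) : Bool :=
  let heading := PySem.Str.lower (pvRstripColon (PySem.Str.strip (pvLstripHash line)))
  heading == "commands" || heading == "command" ||
    heading == "command suggestions" || heading == "suggested commands"

-- A's loop body (stripped = line.strip() inlined)
def pvStepA (st : List String × Bool) (line : String) : List String × Bool :=
  if pvIsCommandsHeading (PySem.Str.strip line) then (st.1, true)
  else if st.2 then
    if PySem.Str.startswith (PySem.Str.strip line) "#" || (PySem.Str.strip line == "") then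
      (st.1 ++ [line], false)
    else (st.1, true)
  else (st.1 ++ [line], false)

def strip_commands_section_py (content : String) : String :=
  PySem.Str.strip (PySem.Str.join "\n"
    ((PySem.Str.splitlines content).foldl pvStepA ([], false)).1)

-- ===== PORT B =====
-- inner while: advance past heading / non-blank non-'#' lines, stop (not consuming) otherwise
def pvSkipB : List String → List String
  | [] => []
  | l :: rest =>
    if pvIsCommandsHeading (PySem.Str.strip l) ||
        (!(PySem.Str.strip l == "") && !PySem.Str.startswith (PySem.Str.strip l) "#") then
      pvSkipB rest
    else l :: rest

-- outer while over the remaining suffix of lines; the Nat argument is pure fuel (the loop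
-- consumes at least one line per step, so fuel = number of lines never runs out)
def pvGoB : Nat → List String → List String
  | 0, _ => []
  | _ + 1, [] => []
  | f + 1, l :: rest =>
    if pvIsCommandsHeading (PySem.Str.strip l) then pvGoB f (pvSkipB rest)
    else l :: pvGoB f rest

def strip_commands_section_py_alt (content : String) : String :=
  PySem.Str.strip (PySem.Str.join "\n"
    (pvGoB (PySem.Str.splitlines content).length (PySem.Str.splitlines content)))

-- ===== PRECONDITION & SPEC =====
def Spec_strip_commands_section_py (content : String) (out : String) : Prop := out = strip_commands_section_py_alt content
instance (content : String) (out : String) : Decidable (Spec_strip_commands_section_py content out) := by unfold Spec_strip_commands_section_py; infer_instance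

-- ===== CLAIM (what is proved, stated in full; the proofs are below) =====
def Claim_equal_strip_commands_section_py : Prop := ∀ (content : String), Dom_strip_commands_section_py content → Spec_strip_commands_section_py content (strip_commands_section_py content)

-- ===== LEMMAS AND PROOFS =====

theorem pvSkipB_length_le (ls : List String) : (pvSkipB ls).length ≤ ls.length := by
  induction ls with
  | nil => simp [pvSkipB]
  | cons l rest ih =>
    rw [pvSkipB]
    split
    · exact ih.trans (Nat.le_succ _)
    · simp

theorem pvSkipB_cons_go (l : String) (rest : List String)
    (hc : (pvIsCommandsHeading (PySem.Str.strip l) ||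
      (!(PySem.Str.strip l == "") && !PySem.Str.startswith (PySem.Str.strip l) "#")) = true) :
    pvSkipB (l :: rest) = pvSkipB rest := by
  rw [pvSkipB, if_pos hc]

theorem pvSkipB_cons_stop (l : String) (rest : List String)
    (hc : (pvIsCommandsHeading (PySem.Str.strip l) ||
      (!(PySem.Str.strip l == "") && !PySem.Str.startswith (PySem.Str.strip l) "#")) = false) :
    pvSkipB (l :: rest) = l :: rest := by
  rw [pvSkipB, if_neg (by rw [hc]; decide)]

theorem pvGoB_cons_h (f : Nat) (l : String) (rest : List String)
    (hh : pvIsCommandsHeading (PySem.Str.strip l) = true) :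
    pvGoB (f + 1) (l :: rest) = pvGoB f (pvSkipB rest) := by
  rw [pvGoB, if_pos hh]

theorem pvGoB_cons_nh (f : Nat) (l : String) (rest : List String)
    (hh : pvIsCommandsHeading (PySem.Str.strip l) = false) :
    pvGoB (f + 1) (l :: rest) = l :: pvGoB f rest := by
  rw [pvGoB, if_neg (by rw [hh]; decide)]

theorem pvStepA_heading (st : List String × Bool) (l : String)
    (hh : pvIsCommandsHeading (PySem.Str.strip l) = true) : pvStepA st l = (st.1, true) := by
  rw [pvStepA, if_pos hh]

theorem pvStepA_off (out : List String) (l : String)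
    (hh : pvIsCommandsHeading (PySem.Str.strip l) = false) :
    pvStepA (out, false) l = (out ++ [l], false) := by
  rw [pvStepA, if_neg (by rw [hh]; decide)]
  rfl

theorem pvStepA_on_exit (out : List String) (l : String)
    (hh : pvIsCommandsHeading (PySem.Str.strip l) = false)
    (hb : (PySem.Str.startswith (PySem.Str.strip l) "#" || (PySem.Str.strip l == "")) = true) :
    pvStepA (out, true) l = (out ++ [l], false) := by
  rw [pvStepA, if_neg (by rw [hh]; decide)]
  show (if (true = true) then _ else _) = _
  rw [if_pos rfl, if_pos hb]

theorem pvStepA_on_skip (out : List String) (l : String)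
    (hh : pvIsCommandsHeading (PySem.Str.strip l) = false)
    (hb : (PySem.Str.startswith (PySem.Str.strip l) "#" || (PySem.Str.strip l == "")) = false) :
    pvStepA (out, true) l = (out, true) := by
  rw [pvStepA, if_neg (by rw [hh]; decide)]
  show (if (true = true) then _ else _) = _
  rw [if_pos rfl, if_neg (by rw [hb]; decide)]

-- with enough fuel the fuel does not matter
theorem pvGoB_fuel : ∀ (f : Nat) (ls : List String), ls.length ≤ f →
    pvGoB (f + 1) ls = pvGoB f ls := by
  intro f
  induction f with
  | zero =>
    intro ls h
    have : ls = [] := List.eq_nil_of_length_eq_zero (Nat.le_zero.mp h)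
    subst this; rfl
  | succ m ih =>
    intro ls h
    cases ls with
    | nil => rfl
    | cons l rest =>
      have hr : rest.length ≤ m := by simp only [List.length_cons] at h; omega
      cases hh : pvIsCommandsHeading (PySem.Str.strip l) with
      | true =>
        rw [pvGoB_cons_h _ _ _ hh, pvGoB_cons_h _ _ _ hh]
        exact ih _ ((pvSkipB_length_le rest).trans hr)
      | false =>
        rw [pvGoB_cons_nh _ _ _ hh, pvGoB_cons_nh _ _ _ hh, ih _ hr]

-- Loop invariant: A's fold from (out, false) produces out ++ pvGoB f lines, and from
-- (out, true) produces out ++ pvGoB f (pvSkipB lines), for any fuel f ≥ length lines.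
theorem pvFold_inv : ∀ (f : Nat) (lines : List String), lines.length ≤ f →
    ∀ out : List String,
    (lines.foldl pvStepA (out, false)).1 = out ++ pvGoB f lines ∧
    (lines.foldl pvStepA (out, true)).1 = out ++ pvGoB f (pvSkipB lines) := by
  intro f
  induction f with
  | zero =>
    intro lines h out
    have : lines = [] := List.eq_nil_of_length_eq_zero (Nat.le_zero.mp h)
    subst this
    constructor <;> simp [pvGoB]
  | succ m ih =>
    intro lines h out
    cases lines with
    | nil => constructor <;> simp [pvGoB, pvSkipB]
    | cons l rest =>
      have hr : rest.length ≤ m := by simp only [List.length_cons] at h; omega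
      have hskr : (pvSkipB rest).length ≤ m := (pvSkipB_length_le rest).trans hr
      constructor
      · -- start with in_section = false
        cases hh : pvIsCommandsHeading (PySem.Str.strip l) with
        | true =>
          rw [List.foldl_cons, pvStepA_heading _ _ hh, pvGoB_cons_h _ _ _ hh]
          exact (ih rest hr out).2
        | false =>
          rw [List.foldl_cons, pvStepA_off _ _ hh, pvGoB_cons_nh _ _ _ hh,
            (ih rest hr (out ++ [l])).1, List.append_assoc]
          rfl
      · -- start with in_section = true
        cases hh : pvIsCommandsHeading (PySem.Str.strip l) with
        | true =>
          rw [List.foldl_cons, pvStepA_heading _ _ hh,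
            pvSkipB_cons_go _ _ (by rw [hh]; exact Bool.true_or _), pvGoB_fuel _ _ hskr]
          exact (ih rest hr out).2
        | false =>
          cases hp : PySem.Str.startswith (PySem.Str.strip l) "#" with
          | true =>
            rw [List.foldl_cons, pvStepA_on_exit _ _ hh (by rw [hp]; exact Bool.true_or _),
              pvSkipB_cons_stop _ _ (by rw [hh, hp]; simp), pvGoB_cons_nh _ _ _ hh,
              (ih rest hr (out ++ [l])).1, List.append_assoc]
            rfl
          | false =>
            cases he : (PySem.Str.strip l == "") with
            | true =>
              rw [List.foldl_cons, pvStepA_on_exit _ _ hh (by rw [hp, he]; decide),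
                pvSkipB_cons_stop _ _ (by rw [hh, hp, he]; decide), pvGoB_cons_nh _ _ _ hh,
                (ih rest hr (out ++ [l])).1, List.append_assoc]
              rfl
            | false =>
              rw [List.foldl_cons, pvStepA_on_skip _ _ hh (by rw [hp, he]; decide),
                pvSkipB_cons_go _ _ (by rw [hh, hp, he]; decide), pvGoB_fuel _ _ hskr]
              exact (ih rest hr out).2

-- ===== VERDICT (by name: the statement is the Claim_ definition above) =====
theorem strip_commands_section_py_spec : Claim_equal_strip_commands_section_py := by
  intro content _
  unfold Spec_strip_commands_section_py strip_commands_section_py strip_commands_section_py_alt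
  rw [(pvFold_inv (PySem.Str.splitlines content).length (PySem.Str.splitlines content)
    le_rfl []).1, List.nil_append]
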